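-- pv_equiv track=rewrite | github.com/MrBrantCode/unitest_baseline | mut_generate/mist_train_cf/cf_359/solution.py | reverse_alphanumeric_text
-- ===== SOURCE A (Python) =====
-- def reverse_alphanumeric_text(text):
--     original_text = list(text)
--     left, right = 0, len(text) - 1
--
--     while left < right:
--         if not original_text[left].isalnum():
--             left += 1
--         elif not original_text[right].isalnum():
--             right -= 1
--         else:
--             original_text[left], original_text[right] = original_text[right], original_text[left]
--             left += 1
--             right -= 1
--
--     return ''.join(original_text)
-- ===== SOURCE B (Python) =====
-- def reverse_alphanumeric_text(text):
--     rev = [c for c in text if c.isalnum()][::-1]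
--     j = 0
--     out = []
--     for c in text:
--         if c.isalnum():
--             out.append(rev[j])
--             j += 1
--         else:
--             out.append(c)
--     return ''.join(out)
-- ===== Notes on version B (the rewrite author's own statement) =====
-- stated objective: alternative
-- what changed: Replaced the convergent two-pointer in-place swap with a filter-extract of the alphanumeric characters followed by a single forward pass that refills them in reversed order, leaving other characters in place.
import Mathlib
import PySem

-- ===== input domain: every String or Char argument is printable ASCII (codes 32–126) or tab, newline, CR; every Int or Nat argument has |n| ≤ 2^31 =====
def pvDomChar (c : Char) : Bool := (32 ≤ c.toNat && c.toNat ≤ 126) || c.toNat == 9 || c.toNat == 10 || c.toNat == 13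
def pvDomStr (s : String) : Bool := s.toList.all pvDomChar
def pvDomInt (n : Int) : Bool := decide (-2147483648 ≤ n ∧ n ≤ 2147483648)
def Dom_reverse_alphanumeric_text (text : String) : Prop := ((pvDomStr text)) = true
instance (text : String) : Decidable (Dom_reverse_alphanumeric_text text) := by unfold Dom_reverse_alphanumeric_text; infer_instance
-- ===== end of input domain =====

-- B replaces A's convergent two-pointer in-place swap by a filter-then-refill forward pass (alternative decomposition, same cost).

-- ===== PORT A =====
-- A's while-loop: left/right are Nat here (in Python both stay ≥ 0 whenever they are
-- used as indices; for the empty string Python's right = -1 and Nat's right = 0 both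
-- make the loop exit immediately). arr[i] is arr.getD i ' ' (indices are in range).
def pvLoopA (arr : List Char) (left right : Nat) : List Char :=
  if _h : left < right then
    if ¬ PySem.Chars.isalnum (arr.getD left ' ') then
      pvLoopA arr (left + 1) right
    else if ¬ PySem.Chars.isalnum (arr.getD right ' ') then
      pvLoopA arr left (right - 1)
    else
      pvLoopA ((arr.set left (arr.getD right ' ')).set right (arr.getD left ' '))
        (left + 1) (right - 1)
  else arr
termination_by right - left
decreasing_by all_goals omega

def reverse_alphanumeric_text (text : String) : String :=
  String.ofList (pvLoopA text.toList 0 (text.toList.length - 1))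

-- ===== PORT B =====
-- the forward refill pass of Source B: rev[j] with j increasing = peel rev from the front;
-- the src = [] branch is unreachable in B (rev holds exactly the alnum chars of text).
def pvRefill : List Char → List Char → List Char
  | [], _ => []
  | c :: rest, src =>
    if PySem.Chars.isalnum c then
      match src with
      | s :: ss => s :: pvRefill rest ss
      | [] => c :: pvRefill rest []
    else c :: pvRefill rest src

def reverse_alphanumeric_text_alt (text : String) : String :=
  String.ofList (pvRefill text.toList ((text.toList.filter PySem.Chars.isalnum).reverse))

-- ===== PRECONDITION & SPEC =====
def Spec_reverse_alphanumeric_text (text : String) (out : String) : Prop := out = reverse_alphanumeric_text_alt text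
instance (text : String) (out : String) : Decidable (Spec_reverse_alphanumeric_text text out) := by unfold Spec_reverse_alphanumeric_text; infer_instance

-- ===== CLAIM (what is proved, stated in full; the proofs are below) =====
def Claim_equal_reverse_alphanumeric_text : Prop := ∀ (text : String), Dom_reverse_alphanumeric_text text → Spec_reverse_alphanumeric_text text (reverse_alphanumeric_text text)

-- ===== LEMMAS AND PROOFS =====

-- the segment arr[l..r] inclusive
def pvSeg (arr : List Char) (l r : Nat) : List Char := (arr.drop l).take (r + 1 - l)

theorem pvRefill_append_not (xs src : List Char) (c : Char)
    (hc : PySem.Chars.isalnum c = false) :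
    pvRefill (xs ++ [c]) src = pvRefill xs src ++ [c] := by
  induction xs generalizing src with
  | nil => simp [pvRefill, hc]
  | cons x rest ih =>
    by_cases hx : PySem.Chars.isalnum x
    · cases src with
      | nil => simp [pvRefill, hx, ih]
      | cons s ss => simp [pvRefill, hx, ih]
    · simp [pvRefill, hx, ih]

theorem pvRefill_append_al (xs src : List Char) (a b : Char)
    (hb : PySem.Chars.isalnum b = true)
    (hlen : src.length = (xs.filter PySem.Chars.isalnum).length) :
    pvRefill (xs ++ [b]) (src ++ [a]) = pvRefill xs src ++ [a] := by
  induction xs generalizing src with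
  | nil =>
    have : src = [] := List.length_eq_zero_iff.mp (by simpa using hlen)
    subst this
    simp [pvRefill, hb]
  | cons x rest ih =>
    by_cases hx : PySem.Chars.isalnum x
    · cases src with
      | nil => simp [hx] at hlen
      | cons s ss =>
        have hss : ss.length = (rest.filter PySem.Chars.isalnum).length := by
          simpa [hx] using hlen
        simp [pvRefill, hx, ih ss hss]
    · have hss : src.length = (rest.filter PySem.Chars.isalnum).length := by
        simpa [hx] using hlen
      simp [pvRefill, hx, ih src hss]

theorem pvSeg_cons (arr : List Char) (l r : Nat) (hl : l ≤ r) (hr : l < arr.length) :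
    pvSeg arr l r = arr[l] :: pvSeg arr (l + 1) r := by
  unfold pvSeg
  rw [List.drop_eq_getElem_cons hr]
  have h1 : r + 1 - l = (r + 1 - (l + 1)) + 1 := by omega
  rw [h1, List.take_succ_cons]

theorem pvSeg_concat (arr : List Char) (l r : Nat) (hl : l ≤ r) (hr1 : 1 ≤ r) (hr : r < arr.length) :
    pvSeg arr l r = pvSeg arr l (r - 1) ++ [arr[r]] := by
  unfold pvSeg
  have h1 : r + 1 - l = (r - l) + 1 := by omega
  have h3 : r - 1 + 1 - l = r - l := by omega
  rw [h1, h3, List.take_add_one]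
  congr 1
  rw [List.getElem?_drop]
  have h2 : l + (r - l) = r := by omega
  rw [h2, List.getElem?_eq_getElem hr]
  rfl

theorem pvSeg_set_outside (arr : List Char) (l r i : Nat) (c : Char)
    (h : i < l ∨ r < i) : pvSeg (arr.set i c) l r = pvSeg arr l r := by
  unfold pvSeg
  rcases h with h | h
  · rw [List.drop_set, if_pos h]
  · by_cases hil : i < l
    · rw [List.drop_set, if_pos hil]
    · rw [List.drop_set, if_neg hil, List.take_set]
      exact List.set_eq_of_length_le (by simp only [List.length_take]; omega)

theorem pvLoopA_seg_base (arr : List Char) (l : Nat) (hr : l < arr.length) :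
    arr = arr.take l ++ pvRefill (pvSeg arr l l) ((pvSeg arr l l).filter PySem.Chars.isalnum).reverse
        ++ arr.drop (l + 1) := by
  have hseg : pvSeg arr l l = [arr[l]] := by
    unfold pvSeg
    rw [List.drop_eq_getElem_cons hr]
    have h1 : l + 1 - l = 1 := by omega
    rw [h1]
    rfl
  have hone : pvRefill [arr[l]] (([arr[l]].filter PySem.Chars.isalnum).reverse) = [arr[l]] := by
    by_cases hc : PySem.Chars.isalnum arr[l] <;> simp [pvRefill, hc]
  rw [hseg, hone]
  conv_lhs => rw [← List.take_append_drop l arr]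
  rw [List.drop_eq_getElem_cons hr]
  simp

theorem pvLoopA_seg_empty (arr : List Char) (r : Nat) :
    arr = arr.take (r + 1) ++ pvRefill (pvSeg arr (r + 1) r)
        ((pvSeg arr (r + 1) r).filter PySem.Chars.isalnum).reverse ++ arr.drop (r + 1) := by
  unfold pvSeg
  simp [pvRefill]

-- main invariant of A's loop
theorem pvLoopA_seg (n : Nat) : ∀ (arr : List Char) (l r : Nat), r - l ≤ n →
    r < arr.length → l ≤ r + 1 →
    pvLoopA arr l r =
      arr.take l ++ pvRefill (pvSeg arr l r) ((pvSeg arr l r).filter PySem.Chars.isalnum).reverse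
        ++ arr.drop (r + 1) := by
  induction n with
  | zero =>
    intro arr l r hn hr hl
    rw [pvLoopA, dif_neg (by omega)]
    rcases (by omega : l = r ∨ l = r + 1) with h | h
    · subst h; exact pvLoopA_seg_base arr l hr
    · subst h; exact pvLoopA_seg_empty arr r
  | succ n ih =>
    intro arr l r hn hr hl
    rw [pvLoopA]
    by_cases hlr : l < r
    · rw [dif_pos hlr]
      have hll : l < arr.length := by omega
      have hgl : arr.getD l ' ' = arr[l] := List.getD_eq_getElem arr ' ' hll
      have hgr : arr.getD r ' ' = arr[r] := List.getD_eq_getElem arr ' ' hr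
      have htk1 : arr.take (l + 1) = arr.take l ++ [arr[l]] := by
        rw [List.take_add_one, List.getElem?_eq_getElem hll]
        rfl
      by_cases hcl : PySem.Chars.isalnum arr[l]
      · by_cases hcr : PySem.Chars.isalnum arr[r]
        · -- swap branch
          rw [hgl, hgr, if_neg (by simp [hcl]), if_neg (by simp [hcr])]
          set arr' := (arr.set l arr[r]).set r arr[l] with harr'
          have hlen' : arr'.length = arr.length := by simp [harr']
          have ihx := ih arr' (l + 1) (r - 1) (by omega) (by omega) (by omega)
          rw [ihx]
          have hcore : pvSeg arr' (l + 1) (r - 1) = pvSeg arr (l + 1) (r - 1) := by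
            rw [harr', pvSeg_set_outside _ _ _ _ _ (Or.inr (by omega)),
              pvSeg_set_outside _ _ _ _ _ (Or.inl (by omega))]
          have htake : arr'.take (l + 1) = arr.take l ++ [arr[r]] := by
            rw [harr', List.take_set]
            have e1 : ((arr.set l arr[r]).take (l + 1)).set r arr[l]
                = (arr.set l arr[r]).take (l + 1) :=
              List.set_eq_of_length_le (by simp only [List.length_take]; omega)
            rw [e1, List.take_set, htk1, List.set_append_right _ _ (by simp only [List.length_take]; omega)]
            have e2 : l - (arr.take l).length = 0 := by simp only [List.length_take]; omega
            rw [e2]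
            rfl
          have hdrop : arr'.drop (r - 1 + 1) = arr[l] :: arr.drop (r + 1) := by
            have hre : r - 1 + 1 = r := by omega
            rw [hre, List.drop_eq_getElem_cons (by omega : r < arr'.length)]
            congr 1
            · simp [harr']
            · rw [harr', List.drop_set, if_pos (by omega), List.drop_set, if_pos (by omega)]
          have hseg : pvSeg arr l r =
              arr[l] :: (pvSeg arr (l + 1) (r - 1) ++ [arr[r]]) := by
            rw [pvSeg_cons arr l r (by omega) hll,
              pvSeg_concat arr (l + 1) r (by omega) (by omega) hr]
          rw [hcore, htake, hdrop, hseg]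
          have hfilt : ((arr[l] :: (pvSeg arr (l + 1) (r - 1) ++ [arr[r]])).filter
              PySem.Chars.isalnum).reverse =
              arr[r] :: (((pvSeg arr (l + 1) (r - 1)).filter PySem.Chars.isalnum).reverse
                ++ [arr[l]]) := by
            simp [hcl, hcr, List.filter_append]
          rw [hfilt]
          have href : pvRefill (arr[l] :: (pvSeg arr (l + 1) (r - 1) ++ [arr[r]]))
              (arr[r] :: (((pvSeg arr (l + 1) (r - 1)).filter PySem.Chars.isalnum).reverse
                ++ [arr[l]])) =
              arr[r] :: (pvRefill (pvSeg arr (l + 1) (r - 1))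
                ((pvSeg arr (l + 1) (r - 1)).filter PySem.Chars.isalnum).reverse ++ [arr[l]]) := by
            have h1 : pvRefill (arr[l] :: (pvSeg arr (l + 1) (r - 1) ++ [arr[r]]))
                (arr[r] :: (((pvSeg arr (l + 1) (r - 1)).filter PySem.Chars.isalnum).reverse
                  ++ [arr[l]])) =
                arr[r] :: pvRefill (pvSeg arr (l + 1) (r - 1) ++ [arr[r]])
                  (((pvSeg arr (l + 1) (r - 1)).filter PySem.Chars.isalnum).reverse
                    ++ [arr[l]]) := by
              simp [pvRefill, hcl]
            rw [h1, pvRefill_append_al _ _ _ _ hcr (by simp)]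
          rw [href]
          simp only [List.append_assoc, List.cons_append, List.nil_append]
        · -- right char not alphanumeric
          rw [hgl, hgr, if_neg (by simp [hcl]), if_pos (by simp [hcr])]
          have ihx := ih arr l (r - 1) (by omega) (by omega) (by omega)
          rw [ihx]
          rw [pvSeg_concat arr l r (by omega) (by omega) hr]
          have hfilt : ((pvSeg arr l (r - 1) ++ [arr[r]]).filter PySem.Chars.isalnum).reverse =
              ((pvSeg arr l (r - 1)).filter PySem.Chars.isalnum).reverse := by
            simp [List.filter_append, hcr]
          rw [hfilt, pvRefill_append_not _ _ _ (by simp [hcr])]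
          have hdr : arr.drop (r - 1 + 1) = arr[r] :: arr.drop (r + 1) := by
            have hre : r - 1 + 1 = r := by omega
            rw [hre, List.drop_eq_getElem_cons hr]
          rw [hdr]
          simp only [List.append_assoc, List.cons_append, List.nil_append]
      · -- left char not alphanumeric
        rw [hgl, if_pos (by simp [hcl])]
        have ihx := ih arr (l + 1) r (by omega) hr (by omega)
        rw [ihx]
        rw [pvSeg_cons arr l r (by omega) hll]
        have hfilt : ((arr[l] :: pvSeg arr (l + 1) r).filter PySem.Chars.isalnum).reverse =
            ((pvSeg arr (l + 1) r).filter PySem.Chars.isalnum).reverse := by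
          simp [hcl]
        rw [hfilt]
        have hrf : pvRefill (arr[l] :: pvSeg arr (l + 1) r)
            ((pvSeg arr (l + 1) r).filter PySem.Chars.isalnum).reverse =
            arr[l] :: pvRefill (pvSeg arr (l + 1) r)
              ((pvSeg arr (l + 1) r).filter PySem.Chars.isalnum).reverse := by
          cases hsrc : ((pvSeg arr (l + 1) r).filter PySem.Chars.isalnum).reverse with
          | nil => simp [pvRefill, hcl]
          | cons s ss => simp [pvRefill, hcl]
        rw [hrf, htk1]
        simp only [List.append_assoc, List.cons_append, List.nil_append]
    · rw [dif_neg hlr]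
      rcases (by omega : l = r ∨ l = r + 1) with h | h
      · subst h; exact pvLoopA_seg_base arr l hr
      · subst h; exact pvLoopA_seg_empty arr r

theorem pvLoopA_eq_refill (arr : List Char) :
    pvLoopA arr 0 (arr.length - 1) =
      pvRefill arr ((arr.filter PySem.Chars.isalnum).reverse) := by
  cases harr : arr with
  | nil => rw [pvLoopA]; rfl
  | cons c rest =>
    rw [← harr]
    have hlen : 0 < arr.length := by rw [harr]; simp
    rw [pvLoopA_seg (arr.length - 1) arr 0 (arr.length - 1) (by omega) (by omega) (by omega)]
    have hseg : pvSeg arr 0 (arr.length - 1) = arr := by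
      unfold pvSeg
      rw [List.drop_zero]
      have : arr.length - 1 + 1 - 0 = arr.length := by omega
      rw [this, List.take_length]
    have hdr : arr.drop (arr.length - 1 + 1) = [] := List.drop_eq_nil_of_le (by omega)
    rw [hseg, hdr]
    simp

-- ===== VERDICT (by name: the statement is the Claim_ definition above) =====
theorem reverse_alphanumeric_text_spec : Claim_equal_reverse_alphanumeric_text := by
  intro text _
  unfold Spec_reverse_alphanumeric_text reverse_alphanumeric_text reverse_alphanumeric_text_alt
  rw [pvLoopA_eq_refill]
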